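-- pv_equiv track=rewrite | github.com/polkerty/zumbers | main.py | sub_zumbers_of_multiset2
-- ===== SOURCE A (Python) =====
-- subset_cache = dict()
--
-- def sub_zumbers_of_multiset2(multiset):
--     if multiset in subset_cache:
--         return subset_cache[multiset]
--     ret = []
--     for i in range(1, 2 ** len(multiset)):
--         item = []
--         tot = 0
--         for j in range(len(multiset)):
--             if i & (1 << j):
--                 item.append(multiset[j])
--                 tot += multiset[j]
--         if tot == 0:
--             ret.append(tuple(item))
--
--     subset_cache[multiset] = ret
--     return ret
-- ===== SOURCE B (Python) =====
-- def sub_zumbers_of_multiset2(multiset):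
--     # Incremental subset-sum DP: sums[mask] = sum of elements selected by mask,
--     # built by doubling (one pass over the elements), then scan masks once.
--     sums = [0]
--     for x in multiset:
--         sums += [s + x for s in sums]
--     ret = []
--     for mask, s in enumerate(sums):
--         if mask and s == 0:
--             ret.append(_pick(multiset, mask))
--     return ret
--
-- def _pick(multiset, mask):
--     item = []
--     for x in multiset:
--         if mask & 1:
--             item.append(x)
--         mask >>= 1
--     return tuple(item)
-- ===== Notes on version B (the rewrite author's own statement) =====
-- stated objective: alternative
-- what changed: Replaces A's per-mask inner bit loop (recomputing each subset and its sum from scratch) by an incremental subset-sum table built by doubling in one pass over the elements, then a single scan of that table that materialises a subset only when its sum is zero.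
import Mathlib
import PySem

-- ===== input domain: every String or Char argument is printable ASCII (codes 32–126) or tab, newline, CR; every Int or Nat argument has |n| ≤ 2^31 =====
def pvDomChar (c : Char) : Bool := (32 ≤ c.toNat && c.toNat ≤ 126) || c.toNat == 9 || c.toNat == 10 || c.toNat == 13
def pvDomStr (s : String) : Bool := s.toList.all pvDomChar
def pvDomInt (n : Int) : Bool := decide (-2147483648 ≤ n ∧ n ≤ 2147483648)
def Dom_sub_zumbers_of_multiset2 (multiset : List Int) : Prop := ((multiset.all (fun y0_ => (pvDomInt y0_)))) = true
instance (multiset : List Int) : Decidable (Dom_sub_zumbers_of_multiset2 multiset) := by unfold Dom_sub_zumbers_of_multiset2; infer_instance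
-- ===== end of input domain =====

-- B builds a subset-sum table by doubling (one pass over the elements) and scans it once,
-- instead of A's per-mask inner bit loop. Equivalence is about the RETURN value;
-- A additionally memoises into a global cache (a side effect B does not perform).

-- ===== PORT A =====
-- A's inner loop over j: the two locals 'item' and 'tot' are the pair components
def pvInner (multiset : List Int) (i : Int) : List Int × Int :=
  (PySem.List.pyRange 0 (multiset.length : Int) 1).foldl
    (fun (st : List Int × Int) j =>
      -- '1 << j' ported as (1 : Int) <<< j.toNat — exact since j ≥ 0 here;
      -- 'multiset[j]' via pyGetD (j always in range here)
      if PySem.Int.band i ((1:Int) <<< j.toNat) ≠ 0 then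
        (st.1 ++ [PySem.List.pyGetD multiset j 0], st.2 + PySem.List.pyGetD multiset j 0)
      else st) (([] : List Int), (0:Int))

-- the global 'subset_cache' only memoises: it never changes the returned value,
-- so the pure port computes the uncached branch
def sub_zumbers_of_multiset2 (multiset : List Int) : List (List Int) :=
  (PySem.List.pyRange 1 ((2:Int) ^ multiset.length) 1).foldl (fun ret i =>
    if (pvInner multiset i).2 = 0 then ret ++ [(pvInner multiset i).1] else ret) []

-- ===== PORT B =====
-- Source B's local 'sums': the subset-sum table built by doubling
def pvSumsDef (multiset : List Int) : List Int :=
  multiset.foldl (fun s x => s ++ s.map (fun t => t + x)) [(0:Int)]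

-- helper _pick of Source B: walk the list, testing the low bit and shifting the mask
def pvPick (multiset : List Int) (mask : Int) : List Int :=
  (multiset.foldl (fun (st : List Int × Int) x =>
      ((if PySem.Int.band st.2 1 ≠ 0 then st.1 ++ [x] else st.1), st.2 >>> 1))
    (([] : List Int), mask)).1

def sub_zumbers_of_multiset2_alt (multiset : List Int) : List (List Int) :=
  (PySem.List.enumerate (pvSumsDef multiset)).foldl (fun ret p =>
    if p.1 ≠ 0 ∧ p.2 = 0 then ret ++ [pvPick multiset p.1] else ret) []

-- ===== PRECONDITION & SPEC =====
def Spec_sub_zumbers_of_multiset2 (multiset : List Int) (out : List (List Int)) : Prop := out = sub_zumbers_of_multiset2_alt multiset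
instance (multiset : List Int) (out : List (List Int)) : Decidable (Spec_sub_zumbers_of_multiset2 multiset out) := by unfold Spec_sub_zumbers_of_multiset2; infer_instance

-- ===== CLAIM (what is proved, stated in full; the proofs are below) =====
def Claim_equal_sub_zumbers_of_multiset2 : Prop := ∀ (multiset : List Int), Dom_sub_zumbers_of_multiset2 multiset → Spec_sub_zumbers_of_multiset2 multiset (sub_zumbers_of_multiset2 multiset)

-- ===== LEMMAS AND PROOFS =====

-- the subset selected by a Nat mask, low bit first (proof-side reference function)
def pvPickN (xs : List Int) (m : Nat) : List Int :=
  match xs with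
  | [] => []
  | x :: t => (if m % 2 = 1 then [x] else []) ++ pvPickN t (m / 2)

lemma pvFoldlCongr {α β : Type} (l : List β) (f g : α → β → α) (a : α)
    (h : ∀ x ∈ l, ∀ s, f s x = g s x) : l.foldl f a = l.foldl g a := by
  induction l generalizing a with
  | nil => rfl
  | cons x t ih =>
    rw [List.foldl_cons, List.foldl_cons, h x (by simp)]
    exact ih _ (fun y hy s => h y (by simp [hy]) s)

lemma pvAndPow (m k : Nat) : (m &&& 2^k ≠ 0) ↔ m.testBit k = true := by
  rw [Nat.and_two_pow]; simp [Nat.testBit]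

lemma pvCondEq (m k : Nat) :
    (PySem.Int.band ((m : Nat) : Int) ((1:Int) <<< ((k : Nat) : Int)) ≠ 0) ↔ (m.testBit k = true) := by
  have h1 : ((1:Int) <<< ((k : Nat) : Int)) = (((1 <<< k : Nat)) : Int) := by
    exact_mod_cast Int.shiftLeft_natCast 1 k
  have h2 : PySem.Int.band ((m : Nat) : Int) (((2^k : Nat)) : Int) = ((m &&& 2^k : Nat) : Int) := by
    exact_mod_cast PySem.Int.band_natCast m (2^k)
  rw [h1, Nat.one_shiftLeft, h2]
  rw [← pvAndPow]
  exact_mod_cast Iff.rfl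

-- B's _pick loop, generalized
lemma pvPick_loop (xs : List Int) : ∀ (m : Nat) (acc : List Int),
    (xs.foldl (fun (st : List Int × Int) x =>
        ((if PySem.Int.band st.2 1 ≠ 0 then st.1 ++ [x] else st.1), st.2 >>> 1))
      (acc, ((m : Nat) : Int))).1 = acc ++ pvPickN xs m := by
  induction xs with
  | nil => intro m acc; simp [pvPickN]
  | cons x t ih =>
    intro m acc
    have hb : PySem.Int.band ((m : Nat) : Int) 1 = ((m &&& 1 : Nat) : Int) := by
      exact_mod_cast PySem.Int.band_natCast m 1
    have hs : (((m : Nat) : Int) >>> 1) = (((m >>> 1 : Nat)) : Int) := rfl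
    rw [List.foldl_cons]
    by_cases h : m % 2 = 1
    · simp only [hb, hs, Nat.and_one_is_mod, Nat.shiftRight_one, h]
      rw [if_pos (by simp)]
      rw [ih (m / 2) (acc ++ [x])]
      simp [pvPickN, h]
    · have h0 : m % 2 = 0 := by omega
      simp only [hb, hs, Nat.and_one_is_mod, Nat.shiftRight_one, h0]
      rw [if_neg (by simp)]
      rw [ih (m / 2) acc]
      simp [pvPickN, h]

lemma pvPick_natCast (xs : List Int) (m : Nat) :
    pvPick xs ((m : Nat) : Int) = pvPickN xs m := by
  unfold pvPick
  rw [pvPick_loop xs m []]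
  simp

-- core of A's inner loop, over List.range with testBit conditions
lemma pvInnerCore (xs : List Int) : ∀ (m : Nat) (acc : List Int) (tot : Int),
    (List.range xs.length).foldl
      (fun (st : List Int × Int) k =>
        if m.testBit k then (st.1 ++ [xs.getD k 0], st.2 + xs.getD k 0) else st)
      (acc, tot)
    = (acc ++ pvPickN xs m, tot + (pvPickN xs m).sum) := by
  induction xs with
  | nil => intro m acc tot; simp [pvPickN]
  | cons x t ih =>
    intro m acc tot
    rw [List.length_cons, List.range_succ_eq_map, List.foldl_cons, List.foldl_map]
    by_cases h : m % 2 = 1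
    · rw [if_pos (by simp [Nat.testBit_zero, h])]
      simp only [Nat.testBit_succ, List.getD_cons_succ, List.getD_cons_zero]
      rw [ih (m / 2) (acc ++ [x]) (tot + x)]
      simp [pvPickN, h, add_assoc]
    · rw [if_neg (by simp [Nat.testBit_zero, h])]
      simp only [Nat.testBit_succ, List.getD_cons_succ]
      rw [ih (m / 2) acc tot]
      simp [pvPickN, h]

-- A's inner loop computes (subset, its sum) of the reference
lemma pvInnerA (xs : List Int) (m : Nat) :
    pvInner xs ((m : Nat) : Int) = (pvPickN xs m, (pvPickN xs m).sum) := by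
  unfold pvInner
  rw [PySem.List.pyRange_one, List.foldl_map]
  have hr : (((xs.length : Int)) - 0).toNat = xs.length := by omega
  rw [hr]
  have hcore := pvInnerCore xs m [] 0
  rw [List.nil_append, zero_add] at hcore
  rw [← hcore]
  apply pvFoldlCongr
  intro k hk st
  rw [zero_add, Int.toNat_natCast, PySem.List.pyGetD_natCast]
  by_cases hb : m.testBit k
  · rw [if_pos ((pvCondEq m k).mpr hb), if_pos hb]
  · rw [if_neg (fun hc => hb ((pvCondEq m k).mp hc)), if_neg (by simp [hb])]

-- pvPickN only reads the low |ys| bits …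
lemma pvPick_low (ys : List Int) (x : Int) : ∀ m, m < 2^ys.length →
    pvPickN (ys ++ [x]) m = pvPickN ys m := by
  induction ys with
  | nil =>
    intro m hm
    have h0 : m = 0 := by simp at hm; omega
    subst h0
    simp [pvPickN]
  | cons y t ih =>
    intro m hm
    have h2 : 2 ^ (y :: t).length = 2 * 2 ^ t.length := by
      rw [List.length_cons, pow_succ]; ring
    have hm' : m / 2 < 2 ^ t.length := by omega
    simp only [List.cons_append, pvPickN]
    rw [ih (m / 2) hm']

-- … and the appended element sits at the top bit
lemma pvPick_high (ys : List Int) (x : Int) : ∀ m, m < 2^ys.length →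
    pvPickN (ys ++ [x]) (2^ys.length + m) = pvPickN ys m ++ [x] := by
  induction ys with
  | nil =>
    intro m hm
    have h0 : m = 0 := by simp at hm; omega
    subst h0
    norm_num [pvPickN]
  | cons y t ih =>
    intro m hm
    have h2 : 2 ^ (y :: t).length = 2 * 2 ^ t.length := by
      rw [List.length_cons, pow_succ]; ring
    have hmod : (2 ^ (y :: t).length + m) % 2 = m % 2 := by omega
    have hdiv : (2 ^ (y :: t).length + m) / 2 = 2 ^ t.length + m / 2 := by omega
    have hm' : m / 2 < 2 ^ t.length := by omega
    simp only [List.cons_append, pvPickN, hmod, hdiv]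
    rw [ih (m / 2) hm']
    rw [List.append_assoc]

-- the doubling fold builds exactly the table of all subset sums, in mask order
lemma pvSums_eq (xs : List Int) :
    pvSumsDef xs = (List.range (2 ^ xs.length)).map (fun m => (pvPickN xs m).sum) := by
  unfold pvSumsDef
  induction xs using List.reverseRecOn with
  | nil => simp [pvPickN, List.range_one]
  | append_singleton ys x ih =>
    rw [List.foldl_append, ih, List.foldl_cons, List.foldl_nil]
    have hlen : 2 ^ (ys ++ [x]).length = 2 ^ ys.length + 2 ^ ys.length := by
      rw [List.length_append, List.length_cons, List.length_nil, pow_succ]; ring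
    rw [hlen, List.range_add, List.map_append, List.map_map, List.map_map]
    congr 1
    · apply List.map_congr_left
      intro m hm
      rw [pvPick_low ys x m (List.mem_range.mp hm)]
    · apply List.map_congr_left
      intro m hm
      have := pvPick_high ys x m (List.mem_range.mp hm)
      simp only [Function.comp_apply]
      rw [this]
      simp

-- enumerate of a mapped range is the range of pairs
lemma pvEnumMap (N : Nat) (f : Nat → Int) (s : Int) :
    PySem.List.enumerate ((List.range N).map f) s
    = (List.range N).map (fun (k : Nat) => (s + (k : Int), f k)) := by
  induction N with
  | zero => simp [PySem.List.enumerate_nil]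
  | succ n ih =>
    rw [List.range_succ, List.map_append, PySem.List.enumerate_append, ih, List.map_append]
    congr 1
    simp [PySem.List.enumerate_cons, PySem.List.enumerate_nil]

-- bridge between A's range(1, 2^n) indexing and B's guarded scan of range(2^n)
lemma pvBridge (M : Nat) (S : Nat → Int) (F : Nat → List Int) :
    ((List.range M).filter (fun k => S (k+1) = 0)).map (fun k => F (k+1))
    = ((List.range (M+1)).filter (fun k => k ≠ 0 ∧ S k = 0)).map F := by
  rw [List.range_succ_eq_map, List.filter_cons]
  simp only [decide_eq_true_eq]
  rw [if_neg (by simp)]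
  rw [List.filter_map, List.map_map]
  congr 1
  apply List.filter_congr
  intro k _
  simp

lemma pvBridge' (N : Nat) (hN : 1 ≤ N) (S : Nat → Int) (F : Nat → List Int) :
    ((List.range (N - 1)).filter (fun k => S (k+1) = 0)).map (fun k => F (k+1))
    = ((List.range N).filter (fun k => k ≠ 0 ∧ S k = 0)).map F := by
  obtain ⟨M, rfl⟩ : ∃ M, N = M + 1 := ⟨N - 1, by omega⟩
  rw [Nat.add_sub_cancel]
  exact pvBridge M S F

-- A reduced to canonical form
lemma pvAside (multiset : List Int) :
    sub_zumbers_of_multiset2 multiset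
    = ((List.range (2 ^ multiset.length - 1)).filter
        (fun k => (pvPickN multiset (k+1)).sum = 0)).map (fun k => pvPickN multiset (k+1)) := by
  unfold sub_zumbers_of_multiset2
  rw [PySem.List.pyRange_one, List.foldl_map]
  have hc : ((2:Int) ^ multiset.length) = ((2 ^ multiset.length : Nat) : Int) := by
    push_cast; ring
  have ht : (((2:Int) ^ multiset.length) - 1).toNat = 2 ^ multiset.length - 1 := by
    rw [hc]
    have : 1 ≤ 2 ^ multiset.length := Nat.one_le_two_pow
    omega
  rw [ht]
  refine (pvFoldlCongr _ _
    (fun ret k => if decide ((pvPickN multiset (k+1)).sum = 0) = true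
      then ret ++ [pvPickN multiset (k+1)] else ret)
    _ ?_).trans ?_
  · intro k _ ret
    dsimp only
    rw [show ((1:Int) + (k : Int)) = (((k + 1 : Nat)) : Int) by push_cast; ring]
    rw [pvInnerA]
    simp only [decide_eq_true_eq]
  · rw [PySem.List.foldl_append_if]
    rfl

-- B reduced to canonical form
lemma pvBside (multiset : List Int) :
    sub_zumbers_of_multiset2_alt multiset
    = ((List.range (2 ^ multiset.length)).filter
        (fun k => k ≠ 0 ∧ (pvPickN multiset k).sum = 0)).map (fun k => pvPickN multiset k) := by
  unfold sub_zumbers_of_multiset2_alt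
  rw [pvSums_eq, pvEnumMap, List.foldl_map]
  refine (pvFoldlCongr _ _
    (fun ret k => if decide (k ≠ 0 ∧ (pvPickN multiset k).sum = 0) = true
      then ret ++ [pvPickN multiset k] else ret)
    _ ?_).trans ?_
  · intro k _ ret
    dsimp only
    rw [zero_add, pvPick_natCast]
    simp only [decide_eq_true_eq]
    have hiff : (((k : Nat) : Int) ≠ 0 ∧ (pvPickN multiset k).sum = 0)
        ↔ (k ≠ 0 ∧ (pvPickN multiset k).sum = 0) := by
      constructor <;> rintro ⟨h1, h2⟩ <;> exact ⟨by exact_mod_cast h1, h2⟩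
    exact if_congr hiff rfl rfl
  · rw [PySem.List.foldl_append_if]
    rfl

theorem pv_main (multiset : List Int) :
    sub_zumbers_of_multiset2 multiset = sub_zumbers_of_multiset2_alt multiset := by
  rw [pvAside, pvBside]
  exact pvBridge' (2 ^ multiset.length) Nat.one_le_two_pow
    (fun m => (pvPickN multiset m).sum) (fun m => pvPickN multiset m)

-- ===== VERDICT (by name: the statement is the Claim_ definition above) =====
theorem sub_zumbers_of_multiset2_spec : Claim_equal_sub_zumbers_of_multiset2 := by
  intro multiset _
  exact pv_main multiset
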